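-- pv_equiv track=rewrite | github.com/tikul/Competitive-Programming | DMOJ/dmopc15c3p3.py | meme
-- ===== SOURCE A (Python) =====
-- def meme(t, cur, path = []):
--     l = len(path)
--     if l == 6 and cur == path[0]:
--         return True
--     if l >= 6:
--         return False
--     if cur in path:
--         return False
--     path = path + [cur]
--     for p in t[cur]:
--         a = meme(t, p, path)
--         if a:
--             return True
--     return False
-- ===== SOURCE B (Python) =====
-- def meme(t, cur, path=[]):
--     if len(path) < 6:
--         if cur in path:
--             return False
--         start = path[0] if path else cur
--         frontier = [path + [cur]]
--         for _ in range(5 - len(path)):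
--             frontier = [p + [v] for p in frontier for v in t[p[-1]] if v not in p]
--         return any(start in t[p[-1]] for p in frontier)
--     return len(path) == 6 and cur == path[0]
-- ===== Notes on version B (the rewrite author's own statement) =====
-- stated objective: alternative
-- what changed: Replaces A's depth-first recursion with early return by an iterative breadth-first search: B materialises the frontier of all vertex-disjoint partial paths level by level and finally tests whether the start vertex is adjacent to any frontier endpoint.
-- outside the precondition, e.g. on meme({0: [0], 5: [99]}, 0, []): A returns False, B returns False; on meme({0: [1], 1: [0], 5: [99]}, 0, []): A returns False, B returns False
import Mathlib
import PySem

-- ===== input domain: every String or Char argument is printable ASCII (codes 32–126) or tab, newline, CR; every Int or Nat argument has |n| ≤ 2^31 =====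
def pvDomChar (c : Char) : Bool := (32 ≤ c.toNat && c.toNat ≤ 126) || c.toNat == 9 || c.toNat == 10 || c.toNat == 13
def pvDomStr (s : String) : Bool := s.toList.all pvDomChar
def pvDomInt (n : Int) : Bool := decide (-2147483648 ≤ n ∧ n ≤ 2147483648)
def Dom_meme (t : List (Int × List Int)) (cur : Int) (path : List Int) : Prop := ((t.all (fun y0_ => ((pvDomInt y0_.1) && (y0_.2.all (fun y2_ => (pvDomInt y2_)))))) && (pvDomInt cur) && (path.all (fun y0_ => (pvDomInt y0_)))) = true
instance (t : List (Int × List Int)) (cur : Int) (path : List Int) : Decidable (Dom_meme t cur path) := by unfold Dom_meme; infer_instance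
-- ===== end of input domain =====

-- B replaces A's depth-first recursion with an iterative breadth-first frontier of partial paths;
-- objective: alternative (same asymptotic cost, different traversal). Return values only.

-- ===== PORT A =====
-- A's recursive DFS, step for step; the dict lookup t[cur] is PySem.Dict.get? (none = KeyError, excluded by Pre_meme).
def meme (t : List (Int × List Int)) (cur : Int) (path : List Int) : Bool :=
  if _h6 : 6 ≤ path.length then
    -- 'if l == 6 and cur == path[0]: return True / if l >= 6: return False'
    decide (path.length = 6) && decide (PySem.List.pyGet? path 0 = some cur)
  else if cur ∈ path then false
  else
    match (PySem.Dict.mk t).get? cur with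
    | none => false   -- Python raises KeyError here; outside Pre_meme
    | some ns => ns.any fun p => meme t p (path ++ [cur])   -- 'for p in t[cur]: if meme(...): return True'
termination_by 7 - path.length
decreasing_by simp [List.length_append]; omega

-- ===== PORT B =====
-- t[v] lookup for B; Python raises KeyError when v is missing (outside Pre_meme), the port yields [].
def memeAdj (t : List (Int × List Int)) (v : Int) : List Int :=
  ((PySem.Dict.mk t).get? v).getD []

-- one pass of B's comprehension: extend each partial path by each fresh neighbour of its last vertex (p[-1]; p is never empty)
def memeStep (t : List (Int × List Int)) (fr : List (List Int)) : List (List Int) :=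
  fr.flatMap fun p => ((memeAdj t (p.getLastD 0)).filter fun v => !p.contains v).map fun v => p ++ [v]

-- 'for _ in range(r): frontier = …'
def memeLevels (t : List (Int × List Int)) : Nat → List (List Int) → List (List Int)
  | 0, fr => fr
  | n + 1, fr => memeLevels t n (memeStep t fr)

def meme_alt (t : List (Int × List Int)) (cur : Int) (path : List Int) : Bool :=
  if path.length < 6 then
    if cur ∈ path then false
    else
      let start := path.headD cur       -- 'path[0] if path else cur'
      let frontier := memeLevels t (5 - path.length) [path ++ [cur]]
      frontier.any fun p => (memeAdj t (p.getLastD 0)).contains start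
  else
    decide (path.length = 6) && decide (PySem.List.pyGet? path 0 = some cur)

-- ===== PRECONDITION & SPEC =====
-- A raises KeyError when it looks up a vertex absent from t. Pre_meme excludes exactly the inputs where a lookup
-- could be reached and asks (closed-form, no re-simulation) that the dict be CLOSED: cur is a key and every listed
-- neighbour is a key. This is slightly narrower than A's lazy lookups (A can return on a non-closed dict whose
-- broken part is unreachable) — see the cites in claim.json.
def Pre_meme (t : List (Int × List Int)) (cur : Int) (path : List Int) : Prop :=
  6 ≤ path.length ∨ cur ∈ path ∨
    (((PySem.Dict.mk t).get? cur).isSome = true ∧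
      ∀ p ∈ t, ∀ v ∈ p.2, ((PySem.Dict.mk t).get? v).isSome = true)
instance (t : List (Int × List Int)) (cur : Int) (path : List Int) : Decidable (Pre_meme t cur path) := by unfold Pre_meme; infer_instance

def pvWitness_meme : (List (Int × List Int)) × Int × List Int := ([(0, [1]), (1, [2, 0]), (2, [0])], 0, [])

def Spec_meme (t : List (Int × List Int)) (cur : Int) (path : List Int) (out : Bool) : Prop := out = meme_alt t cur path
instance (t : List (Int × List Int)) (cur : Int) (path : List Int) (out : Bool) : Decidable (Spec_meme t cur path out) := by unfold Spec_meme; infer_instance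

-- ===== CLAIM (what is proved, stated in full; the proofs are below) =====
def Claim_equal_meme : Prop := ∀ (t : List (Int × List Int)) (cur : Int) (path : List Int), Dom_meme t cur path → Pre_meme t cur path → Spec_meme t cur path (meme t cur path)

-- ===== LEMMAS AND PROOFS =====

-- any distributes over the levels of a frontier
lemma memeLevels_any (t : List (Int × List Int)) (c : List Int → Bool) :
    ∀ (n : Nat) (fr : List (List Int)),
      (memeLevels t n fr).any c = fr.any fun q => (memeLevels t n [q]).any c := by
  intro n
  induction n with
  | zero => intro fr; simp [memeLevels]
  | succ n ih =>
    intro fr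
    show (memeLevels t n (memeStep t fr)).any c = _
    rw [ih, memeStep, List.any_flatMap]
    refine congrArg (List.any fr) (funext fun q => ?_)
    show _ = (memeLevels t n (memeStep t [q])).any c
    rw [ih]
    simp [memeStep]

-- core invariant: A's per-neighbour recursion from path q equals B's frontier search started at [q]
lemma meme_core (t : List (Int × List Int))
    (hC : ∀ p ∈ t, ∀ v ∈ p.2, ((PySem.Dict.mk t).get? v).isSome = true) :
    ∀ (n : Nat) (q ns : List Int) (start : Int),
      q.head? = some start →
      q.length + n = 6 →
      (PySem.Dict.mk t).get? (q.getLastD 0) = some ns →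
      (ns.any fun p => meme t p q)
        = (memeLevels t n [q]).any fun p => (memeAdj t (p.getLastD 0)).contains start := by
  intro n
  induction n with
  | zero =>
    intro q ns start hhd hlen hns
    cases q with
    | nil => simp at hhd
    | cons a l =>
      simp only [List.head?_cons, Option.some.injEq] at hhd
      subst hhd
      have h6 : (a :: l).length = 6 := by simpa using hlen
      have hget : PySem.List.pyGet? (a :: l) 0 = some a := by
        simp [PySem.List.pyGet?, PySem.List.pyIdx?]
      simp only [memeLevels, List.any_cons, List.any_nil, Bool.or_false]
      rw [memeAdj, hns, Option.getD_some]
      rw [Bool.eq_iff_iff]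
      simp only [List.any_eq_true, List.contains_iff_mem]
      constructor
      · rintro ⟨p, hp, h⟩
        rw [meme, dif_pos (by omega : 6 ≤ (a :: l).length)] at h
        simp only [hget, h6, Bool.and_eq_true, decide_eq_true_eq, Option.some.injEq] at h
        exact h.2 ▸ hp
      · intro h
        refine ⟨a, h, ?_⟩
        rw [meme, dif_pos (by omega : 6 ≤ (a :: l).length)]
        simp [h6]
  | succ n ih =>
    intro q ns start hhd hlen hns
    have hlt : ¬ 6 ≤ q.length := by omega
    have hmem : ((q.getLastD 0), ns) ∈ t :=
      PySem.Dict.mem_items_of_get?_eq_some _ hns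
    -- rewrite each branch of A's recursion using the induction hypothesis
    have key : ∀ p ∈ ns, meme t p q = (if p ∈ q then false
          else (memeLevels t n [q ++ [p]]).any
            fun r => (memeAdj t (r.getLastD 0)).contains start) := by
      intro p hp
      rw [meme, dif_neg hlt]
      by_cases hin : p ∈ q
      · simp [hin]
      · rw [if_neg hin, if_neg hin]
        have hpk := hC _ hmem p hp
        obtain ⟨ms, hms⟩ := Option.isSome_iff_exists.mp hpk
        rw [hms]
        have hhd' : (q ++ [p]).head? = some start := by
          cases q with
          | nil => simp at hhd
          | cons a l => simpa using hhd
        have hlast' : (q ++ [p]).getLastD 0 = p := List.getLastD_concat ..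
        exact ih (q ++ [p]) ms start hhd' (by simp; omega) (by rw [hlast']; exact hms)
    have step1 : (ns.any fun p => meme t p q)
        = ns.any fun p => if p ∈ q then false
            else (memeLevels t n [q ++ [p]]).any
              fun r => (memeAdj t (r.getLastD 0)).contains start := by
      rw [Bool.eq_iff_iff]
      simp only [List.any_eq_true]
      constructor
      · rintro ⟨p, hp, h⟩; exact ⟨p, hp, (key p hp) ▸ h⟩
      · rintro ⟨p, hp, h⟩; exact ⟨p, hp, (key p hp).symm ▸ h⟩
    rw [step1]
    -- compute B's side one level down
    show _ = (memeLevels t n (memeStep t [q])).any _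
    rw [memeLevels_any]
    have hstep : memeStep t [q]
        = ((memeAdj t (q.getLastD 0)).filter fun v => !q.contains v).map fun v => q ++ [v] := by
      simp [memeStep]
    rw [hstep, memeAdj, hns, Option.getD_some, List.any_map, List.any_filter]
    refine congrArg (List.any ns) (funext fun p => ?_)
    by_cases hin : p ∈ q
    · rw [if_pos hin, List.contains_iff_mem.mpr hin]
      simp
    · rw [if_neg hin, (by rw [← Bool.not_eq_true, List.contains_iff_mem]; exact hin : q.contains p = false)]
      simp only [Bool.not_false, Bool.true_and, Function.comp_apply]

-- ===== VERDICT (by name: the statement is the Claim_ definition above) =====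
theorem meme_spec : Claim_equal_meme := by
  intro t cur path _hDom hPre
  unfold Spec_meme
  by_cases h6 : 6 ≤ path.length
  · rw [meme, dif_pos h6, meme_alt, if_neg (show ¬ path.length < 6 by omega)]
  · rw [meme, dif_neg h6, meme_alt]
    rw [if_pos (show path.length < 6 by omega)]
    by_cases hin : cur ∈ path
    · simp [hin]
    · rw [if_neg hin, if_neg hin]
      rcases hPre with h | h | ⟨hk, hC⟩
      · omega
      · exact absurd h hin
      · obtain ⟨ns, hns⟩ := Option.isSome_iff_exists.mp hk
        rw [hns]
        have hhd : (path ++ [cur]).head? = some (path.headD cur) := by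
          cases path <;> simp
        have hlast : (path ++ [cur]).getLastD 0 = cur := List.getLastD_concat ..
        exact meme_core t hC (5 - path.length) (path ++ [cur]) ns (path.headD cur)
          hhd (by simp; omega) (by rw [hlast]; exact hns)
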